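-- pv_equiv track=rewrite | github.com/QingQueFans/qingque_moveit | moveit_core/planning_scene/unified_tools/src/ps_tools/cli_backup.py | _parse_selection_with_map
-- ===== SOURCE A (Python) =====
-- from typing import Dict, List, Any, Optional, Tuple
--
-- def _parse_selection_with_map(selection: str, display_map: Dict[int, str]) -> List[str]:
--     """使用显示映射解析用户选择 - 确保ID干净"""
--     selection = selection.strip().lower()
--
--     if selection == 'all':
--         return list(display_map.values())
--
--     selected = []
--
--     # 处理范围选择
--     if '-' in selection and selection.count('-') == 1:
--         try:
--             start_str, end_str = selection.split('-')
--             start = int(start_str.strip())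
--             end = int(end_str.strip())
--
--             for i in range(start, end + 1):
--                 if i in display_map:
--                     # 🆕 确保提取干净的ID
--                     obj_id = display_map[i]
--                     if ' (' in obj_id:
--                         obj_id = obj_id.split(' (')[0].strip()
--                     selected.append(obj_id)
--             return selected
--         except:
--             pass
--
--     # 处理多个数字选择
--     try:
--         indices = [int(idx.strip()) for idx in selection.split()]
--         for idx in indices:
--             if idx in display_map:
--                 obj_id = display_map[idx]
--                 if ' (' in obj_id:
--                     obj_id = obj_id.split(' (')[0].strip()
--                 selected.append(obj_id)
--         return selected
--     except:
--         pass
--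
--     return []
-- ===== SOURCE B (Python) =====
-- def _parse_selection_with_map(selection, display_map):
--     """Parse a user selection (all / range / list of indices) into cleaned object IDs.
--     Instead of scanning every integer of a range, only the display_map keys that
--     fall inside the range are collected and sorted (an alternative strategy)."""
--     sel = selection.strip().lower()
--
--     if sel == 'all':
--         return list(display_map.values())
--
--     if '-' in sel and sel.count('-') == 1:
--         start_s, end_s = sel.split('-')
--         start, end = _to_int(start_s), _to_int(end_s)
--         if start is not None and end is not None:
--             keys = sorted(k for k in display_map if start <= k <= end)
--             return [_clean(display_map[k]) for k in keys]
--
--     maybe_ints = [_to_int(tok) for tok in sel.split()]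
--     if all(v is not None for v in maybe_ints):
--         return [_clean(display_map[i]) for i in maybe_ints if i in display_map]
--     return []
--
--
-- def _to_int(text):
--     try:
--         return int(text.strip())
--     except ValueError:
--         return None
--
--
-- def _clean(name):
--     return name.split(' (')[0].strip() if ' (' in name else name
-- ===== Notes on version B (the rewrite author's own statement) =====
-- stated objective: alternative
-- what changed: For a range selection 'a-b', B collects and sorts only the display_map keys falling inside [a,b] instead of scanning every integer from a to b, and the list branch is an all-or-nothing parse plus one comprehension instead of an appending loop driven by try/except.
import Mathlib
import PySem

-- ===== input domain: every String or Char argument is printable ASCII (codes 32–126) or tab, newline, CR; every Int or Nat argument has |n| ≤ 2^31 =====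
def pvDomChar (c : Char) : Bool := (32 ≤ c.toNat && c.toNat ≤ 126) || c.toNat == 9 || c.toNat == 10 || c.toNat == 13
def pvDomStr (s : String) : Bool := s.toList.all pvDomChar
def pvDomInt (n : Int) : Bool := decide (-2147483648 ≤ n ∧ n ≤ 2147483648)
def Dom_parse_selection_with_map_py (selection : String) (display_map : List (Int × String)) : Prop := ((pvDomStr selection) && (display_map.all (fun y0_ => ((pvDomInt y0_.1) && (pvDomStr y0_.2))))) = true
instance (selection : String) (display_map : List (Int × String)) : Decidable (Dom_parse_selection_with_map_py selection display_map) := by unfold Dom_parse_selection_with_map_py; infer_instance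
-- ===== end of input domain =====

-- B replaces A's scan of every integer in [start, end] by sorting only the display_map keys
-- that fall in the range (objective: alternative algorithm, same measured cost).

-- ===== PORT A =====
-- obj_id.split(' (')[0].strip() if ' (' in obj_id else obj_id
def pvCleanA (name : String) : String :=
  if PySem.Str.isIn " (" name then
    PySem.Str.strip (((PySem.Str.split? name " (").getD []).headD name)
  else name

-- the comprehension [int(idx.strip()) for idx in toks] inside try: None = the ValueError
def pvIntsA (toks : List String) : Option (List Int) :=
  match toks with
  | [] => some []
  | t :: rest =>
    match PySem.Int.ofStr? (PySem.Str.strip t) with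
    | none => none
    | some v => (pvIntsA rest).map (fun l => v :: l)

-- A's append loop: for i in idxs: if i in display_map: selected.append(clean(display_map[i]))
def pvSelectA (d : PySem.Dict Int String) (idxs : List Int) : List String :=
  idxs.foldl (fun acc i => if d.contains i then acc ++ [pvCleanA (d.getD i "")] else acc) []

-- A's "multiple numbers" branch (the final try/except block)
def pvMultiA (sel : String) (d : PySem.Dict Int String) : List String :=
  match pvIntsA (PySem.Str.split₀ sel) with
  | some idxs => pvSelectA d idxs
  | none => []

-- the range branch body: none = int() raised, handled by "except: pass"
def pvRangeA? (d : PySem.Dict Int String) (a b : String) : Option (List String) :=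
  match PySem.Int.ofStr? (PySem.Str.strip a), PySem.Int.ofStr? (PySem.Str.strip b) with
  | some s, some e => some (pvSelectA d (PySem.List.pyRange s (e + 1) 1))
  | _, _ => none

def parse_selection_with_map_py (selection : String) (display_map : List (Int × String)) : List String :=
  let sel := PySem.Str.lower (PySem.Str.strip selection)
  let d := PySem.Dict.ofList display_map
  if sel = "all" then d.values
  else if PySem.Str.isIn "-" sel && (PySem.Str.count sel "-" == 1) then
    -- except: pass on this branch falls through to the "multiple numbers" branch
    match PySem.Str.split? sel "-" with
    | some [a, b] =>
      match pvRangeA? d a b with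
      | some r => r
      | none => pvMultiA sel d
    | _ => pvMultiA sel d
  else pvMultiA sel d

-- ===== PORT B =====
def pvCleanB (name : String) : String :=
  if PySem.Str.isIn " (" name then
    PySem.Str.strip (((PySem.Str.split? name " (").getD []).headD name)
  else name

-- [_to_int(tok) for tok in toks]
def pvOptsB (toks : List String) : List (Option Int) :=
  toks.map (fun t => PySem.Int.ofStr? (PySem.Str.strip t))

-- B's list branch: all-or-nothing parse, then one comprehension
def pvMultiB (sel : String) (d : PySem.Dict Int String) : List String :=
  let opts := pvOptsB (PySem.Str.split₀ sel)
  if opts.all (fun o => o.isSome) then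
    ((opts.filterMap id).filter (fun i => d.contains i)).map (fun i => pvCleanB (d.getD i ""))
  else []

-- B's range branch: sorted(k for k in display_map if start <= k <= end), then one comprehension
def pvRangeB? (d : PySem.Dict Int String) (a b : String) : Option (List String) :=
  match PySem.Int.ofStr? (PySem.Str.strip a), PySem.Int.ofStr? (PySem.Str.strip b) with
  | none, _ => none
  | _, none => none
  | some s, some e =>
    some ((PySem.List.sorted ((PySem.Dict.keys d).filter (fun k => decide (s ≤ k) && decide (k ≤ e))) id).map
      (fun k => pvCleanB (d.getD k "")))

def parse_selection_with_map_py_alt (selection : String) (display_map : List (Int × String)) : List String :=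
  let sel := PySem.Str.lower (PySem.Str.strip selection)
  let d := PySem.Dict.ofList display_map
  if sel = "all" then d.values
  else if PySem.Str.isIn "-" sel && (PySem.Str.count sel "-" == 1) then
    match PySem.Str.split? sel "-" with
    | none => pvMultiB sel d
    | some parts =>
      -- a, b = sel.split('-'): exactly two pieces, anything else is unreachable under the guard
      match parts with
      | [] => pvMultiB sel d
      | a :: rest =>
        match rest with
        | [] => pvMultiB sel d
        | b :: rest2 =>
          match rest2 with
          | [] =>
            match pvRangeB? d a b with
            | none => pvMultiB sel d
            | some r => r
          | _ :: _ => pvMultiB sel d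
  else pvMultiB sel d

-- ===== PRECONDITION & SPEC =====
def Spec_parse_selection_with_map_py (selection : String) (display_map : List (Int × String)) (out : List String) : Prop := out = parse_selection_with_map_py_alt selection display_map
instance (selection : String) (display_map : List (Int × String)) (out : List String) : Decidable (Spec_parse_selection_with_map_py selection display_map out) := by unfold Spec_parse_selection_with_map_py; infer_instance

-- ===== CLAIM (what is proved, stated in full; the proofs are below) =====
def Claim_equal_parse_selection_with_map_py : Prop := ∀ (selection : String) (display_map : List (Int × String)), Dom_parse_selection_with_map_py selection display_map → Spec_parse_selection_with_map_py selection display_map (parse_selection_with_map_py selection display_map)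

-- ===== LEMMAS AND PROOFS =====

theorem pvClean_eq : pvCleanB = pvCleanA := rfl

theorem pvSelectA_eq (d : PySem.Dict Int String) (idxs : List Int) :
    pvSelectA d idxs
      = (idxs.filter (fun i => d.contains i)).map (fun i => pvCleanA (d.getD i "")) := by
  unfold pvSelectA
  exact PySem.List.foldl_append_if _ _ idxs []

theorem pvInts_some (toks : List String) (idxs : List Int) (h : pvIntsA toks = some idxs) :
    (pvOptsB toks).all (fun o => o.isSome) = true ∧ (pvOptsB toks).filterMap id = idxs := by
  induction toks generalizing idxs with
  | nil =>
    simp [pvIntsA] at h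
    simp [pvOptsB, ← h]
  | cons t rest ih =>
    unfold pvIntsA at h
    cases hp : PySem.Int.ofStr? (PySem.Str.strip t) with
    | none => simp [hp] at h
    | some v =>
      rw [hp] at h
      cases hr : pvIntsA rest with
      | none => simp [hr] at h
      | some l =>
        rw [hr] at h
        simp only [Option.map_some, Option.some.injEq] at h
        obtain ⟨h1, h2⟩ := ih l hr
        have hopts : pvOptsB (t :: rest) = some v :: pvOptsB rest := by simp [pvOptsB, hp]
        rw [hopts]
        refine ⟨by simp [List.all_cons, h1], ?_⟩
        rw [List.filterMap_cons, ← h]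
        exact congrArg (v :: ·) h2

theorem pvInts_none (toks : List String) (h : pvIntsA toks = none) :
    (pvOptsB toks).all (fun o => o.isSome) = false := by
  induction toks with
  | nil => simp [pvIntsA] at h
  | cons t rest ih =>
    unfold pvIntsA at h
    cases hp : PySem.Int.ofStr? (PySem.Str.strip t) with
    | none =>
      have hopts : pvOptsB (t :: rest) = none :: pvOptsB rest := by simp [pvOptsB, hp]
      rw [hopts, List.all_cons]
      simp
    | some v =>
      rw [hp] at h
      cases hr : pvIntsA rest with
      | none =>
        have hopts : pvOptsB (t :: rest) = some v :: pvOptsB rest := by simp [pvOptsB, hp]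
        rw [hopts, List.all_cons, ih hr]
        simp
      | some l => simp [hr] at h

theorem pvMulti_eq (sel : String) (d : PySem.Dict Int String) :
    pvMultiB sel d = pvMultiA sel d := by
  unfold pvMultiA pvMultiB
  cases h : pvIntsA (PySem.Str.split₀ sel) with
  | none => simp [pvInts_none _ h]
  | some idxs =>
    obtain ⟨h1, h2⟩ := pvInts_some _ _ h
    have h2' : List.filterMap (fun x : Option Int => x) (pvOptsB (PySem.Str.split₀ sel)) = idxs := h2
    simp [h1, pvSelectA_eq, pvClean_eq, h2']

theorem pvRange_eq (d : PySem.Dict Int String) (hnd : (PySem.Dict.keys d).Nodup) (s e : Int) :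
    PySem.List.sorted ((PySem.Dict.keys d).filter (fun k => decide (s ≤ k) && decide (k ≤ e))) id
      = (PySem.List.pyRange s (e + 1) 1).filter (fun i => d.contains i) := by
  apply PySem.List.sorted_eq_of_perm_of_pairwise_lt
  · apply (List.perm_ext_iff_of_nodup ?_ ?_).2
    · intro k
      simp only [List.mem_filter, PySem.List.mem_pyRange_one, PySem.Dict.contains_iff_mem_keys,
        Bool.and_eq_true, decide_eq_true_eq]
      constructor
      · rintro ⟨⟨hs, hl⟩, hm⟩; exact ⟨hm, by omega, by omega⟩
      · rintro ⟨hm, hs, hl⟩; exact ⟨⟨by omega, by omega⟩, hm⟩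
    · exact List.Nodup.filter _ (PySem.List.nodup_pyRange_one _ _)
    · exact List.Nodup.filter _ hnd
  · simpa using List.Pairwise.filter _ (PySem.List.pairwise_lt_pyRange_one _ _)

theorem pvRange?_eq (d : PySem.Dict Int String) (hnd : (PySem.Dict.keys d).Nodup) (a b : String) :
    pvRangeB? d a b = pvRangeA? d a b := by
  unfold pvRangeA? pvRangeB?
  cases PySem.Int.ofStr? (PySem.Str.strip a) with
  | none => rfl
  | some s =>
    cases PySem.Int.ofStr? (PySem.Str.strip b) with
    | none => rfl
    | some e =>
      show some ((PySem.List.sorted ((PySem.Dict.keys d).filter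
          (fun k => decide (s ≤ k) && decide (k ≤ e))) id).map (fun k => pvCleanB (d.getD k "")))
        = some (pvSelectA d (PySem.List.pyRange s (e + 1) 1))
      rw [pvRange_eq d hnd s e, pvSelectA_eq, pvClean_eq]

theorem pvCore (sel : String) (d : PySem.Dict Int String) (hnd : (PySem.Dict.keys d).Nodup) :
    (if sel = "all" then PySem.Dict.values d
     else if PySem.Str.isIn "-" sel && (PySem.Str.count sel "-" == 1) then
       match PySem.Str.split? sel "-" with
       | some [a, b] =>
         match pvRangeA? d a b with
         | some r => r
         | none => pvMultiA sel d
       | _ => pvMultiA sel d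
     else pvMultiA sel d)
    = (if sel = "all" then PySem.Dict.values d
       else if PySem.Str.isIn "-" sel && (PySem.Str.count sel "-" == 1) then
         match PySem.Str.split? sel "-" with
         | none => pvMultiB sel d
         | some parts =>
           match parts with
           | [] => pvMultiB sel d
           | a :: rest =>
             match rest with
             | [] => pvMultiB sel d
             | b :: rest2 =>
               match rest2 with
               | [] =>
                 match pvRangeB? d a b with
                 | none => pvMultiB sel d
                 | some r => r
               | _ :: _ => pvMultiB sel d
       else pvMultiB sel d) := by
  by_cases hall : sel = "all"
  · rw [if_pos hall, if_pos hall]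
  · rw [if_neg hall, if_neg hall]
    by_cases hg : (PySem.Str.isIn "-" sel && (PySem.Str.count sel "-" == 1)) = true
    · rw [if_pos hg, if_pos hg]
      cases PySem.Str.split? sel "-" with
      | none => exact (pvMulti_eq sel d).symm
      | some parts =>
        rcases parts with _ | ⟨a, _ | ⟨b, _ | _⟩⟩
        · exact (pvMulti_eq sel d).symm
        · exact (pvMulti_eq sel d).symm
        · show (match pvRangeA? d a b with | some r => r | none => pvMultiA sel d)
              = (match pvRangeB? d a b with | none => pvMultiB sel d | some r => r)
          rw [pvRange?_eq d hnd a b]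

          cases pvRangeA? d a b with
          | some r => rfl
          | none => exact (pvMulti_eq sel d).symm
        · exact (pvMulti_eq sel d).symm
    · rw [if_neg hg, if_neg hg]
      exact (pvMulti_eq sel d).symm

-- ===== VERDICT (by name: the statement is the Claim_ definition above) =====
theorem parse_selection_with_map_py_spec : Claim_equal_parse_selection_with_map_py := by
  intro selection display_map _
  show parse_selection_with_map_py selection display_map
      = parse_selection_with_map_py_alt selection display_map
  exact pvCore (PySem.Str.lower (PySem.Str.strip selection))
    (PySem.Dict.ofList display_map) (PySem.Dict.nodup_keys_ofList display_map)
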